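-- pv_equiv track=rewrite | github.com/monijuan/leetcode_python | code/AC3_hard/407. 接雨水 II.py | onsSide
-- ===== SOURCE A (Python) =====
-- from typing import List
--
-- def onsSide(heights:List[int]):
--     res = []
--     highest = 0
--     stack = []
--     for height in heights:
--         if height<highest:
--             stack.append(height)
--         else:
--             for h in stack:
--                 res.append(min(height,highest)-h)
--             stack = [height]   # 注意，这个最高点之后还会用到
--             highest = height
--     return res,stack
-- ===== SOURCE B (Python) =====
-- from typing import List
--
-- def onsSide(heights: List[int]):
--     # find index of the last "record" element (h >= running max, baseline 0)
--     last = 0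
--     m = 0
--     for i, h in enumerate(heights):
--         if h >= m:
--             m = h
--             last = i
--     # prefix-max differences for everything before the last record, slice off the rest
--     res = []
--     m = 0
--     for h in heights[:last]:
--         m = max(m, h)
--         res.append(m - h)
--     return res, heights[last:]
-- ===== Notes on version B (the rewrite author's own statement) =====
-- stated objective: simpler
-- what changed: Replaces A's incremental stack push/flush (nested inner loop emitting min(height,highest)-h at each record) by first locating the last record index in one enumerate pass, then computing the result as prefix-maximum differences over heights[:last] and returning heights[last:] by slicing.
import Mathlib
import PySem

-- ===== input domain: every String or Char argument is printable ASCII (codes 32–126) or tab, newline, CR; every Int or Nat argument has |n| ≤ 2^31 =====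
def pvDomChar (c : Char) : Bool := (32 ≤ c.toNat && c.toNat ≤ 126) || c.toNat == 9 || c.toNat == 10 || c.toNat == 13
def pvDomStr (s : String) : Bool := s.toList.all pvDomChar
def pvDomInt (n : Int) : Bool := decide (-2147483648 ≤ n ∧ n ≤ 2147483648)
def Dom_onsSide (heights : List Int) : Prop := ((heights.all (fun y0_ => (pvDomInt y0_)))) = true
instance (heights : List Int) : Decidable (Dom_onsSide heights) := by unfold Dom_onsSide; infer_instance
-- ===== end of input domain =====

-- B replaces A's incremental stack push/flush by locating the last "record" index and
-- building the result from a prefix-maximum pass plus two slices (objective: simpler).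

-- ===== PORT A =====
-- state = (res, highest, stack)
def onsSideStepA (st : List Int × Int × List Int) (height : Int) : List Int × Int × List Int :=
  if height < st.2.1 then (st.1, st.2.1, st.2.2 ++ [height])
  else
    -- for h in stack: res.append(min(height, highest) - h); stack = [height]; highest = height
    (st.1 ++ st.2.2.map (fun h => min height st.2.1 - h), height, [height])

def onsSide (heights : List Int) : List Int × List Int :=
  let st := heights.foldl onsSideStepA ([], 0, [])
  (st.1, st.2.2)

-- ===== PORT B =====
-- last-record fold: p = (last, m); record rule h >= m
def onsSideLastB (p : Int × Int) (ih : Int × Int) : Int × Int :=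
  if ih.2 ≥ p.2 then (ih.1, ih.2) else p

-- prefix-max/difference fold: p = (m, res)
def onsSideResB (p : Int × List Int) (h : Int) : Int × List Int :=
  (max p.1 h, p.2 ++ [max p.1 h - h])

def onsSide_alt (heights : List Int) : List Int × List Int :=
  let lm := (PySem.List.enumerate heights).foldl onsSideLastB (0, 0)
  -- `last` is always ≥ 0, so heights[:last] / heights[last:] are take/drop of last.toNat
  let last := lm.1.toNat
  let res := ((heights.take last).foldl onsSideResB (0, [])).2
  (res, heights.drop last)

-- ===== PRECONDITION & SPEC =====
def Spec_onsSide (heights : List Int) (out : List Int × List Int) : Prop := out = onsSide_alt heights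
instance (heights : List Int) (out : List Int × List Int) : Decidable (Spec_onsSide heights out) := by unfold Spec_onsSide; infer_instance

-- ===== CLAIM (what is proved, stated in full; the proofs are below) =====
def Claim_equal_onsSide : Prop := ∀ (heights : List Int), Dom_onsSide heights → Spec_onsSide heights (onsSide heights)

-- ===== LEMMAS AND PROOFS =====

/-- Combined loop invariant, proved by induction on the list from the right. -/
theorem onsSide_inv (xs : List Int) : ∃ r : Nat, r ≤ xs.length ∧
    (PySem.List.enumerate xs).foldl onsSideLastB (0, 0) = ((r : Int), xs.foldl max 0) ∧
    xs.foldl onsSideStepA ([], 0, []) =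
      (((xs.take r).foldl onsSideResB (0, [])).2, xs.foldl max 0, xs.drop r) ∧
    xs.foldl onsSideResB (0, []) =
      (xs.foldl max 0,
       ((xs.take r).foldl onsSideResB (0, [])).2 ++ (xs.drop r).map (fun h => xs.foldl max 0 - h)) := by
  induction xs using List.reverseRecOn with
  | nil => exact ⟨0, by simp [PySem.List.enumerate]⟩
  | append_singleton xs y ih =>
    obtain ⟨r, hr, hlm, ha, hb⟩ := ih
    set m := xs.foldl max 0 with hm
    have hm' : (xs ++ [y]).foldl max 0 = max m y := by simp [hm]
    have htake : (xs ++ [y]).take r = xs.take r := List.take_append_of_le_length hr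
    have hdrop : (xs ++ [y]).drop r = xs.drop r ++ [y] := List.drop_append_of_le_length hr
    have henum : PySem.List.enumerate (xs ++ [y]) 0
        = PySem.List.enumerate xs 0 ++ [((xs.length : Int), y)] := by
      simp [PySem.List.enumerate_append]
    by_cases hy : y ≥ m
    · refine ⟨xs.length, by simp, ?_, ?_, ?_⟩
      · simp [henum, hlm, onsSideLastB, hy, hm']
      · have hmin : min y m = m := min_eq_right hy
        simp only [List.foldl_append, ha, hb, List.foldl_cons, List.foldl_nil,
          onsSideStepA, hmin, hm', List.take_left, List.drop_left]
        rw [if_neg (by omega)]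
        simp [max_eq_right hy]
      · simp only [List.foldl_append, hb, List.foldl_cons, List.foldl_nil,
          onsSideResB, hm', List.take_left, List.drop_left]
        simp
    · replace hy : y < m := lt_of_not_ge hy
      have hmy : max m y = m := max_eq_left hy.le
      refine ⟨r, by simp; omega, ?_, ?_, ?_⟩
      · simp [henum, hlm, onsSideLastB, hm', hmy]
        omega
      · simp only [List.foldl_append, ha, List.foldl_cons, List.foldl_nil,
          onsSideStepA, hm', hmy, htake, hdrop]
        rw [if_pos hy]
      · simp only [List.foldl_append, hb, List.foldl_cons, List.foldl_nil,
          onsSideResB, hm', hmy, htake, hdrop]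
        simp

-- ===== VERDICT (by name: the statement is the Claim_ definition above) =====
theorem onsSide_spec : Claim_equal_onsSide := by
  intro heights _
  unfold Spec_onsSide onsSide onsSide_alt
  obtain ⟨r, hr, hlm, ha, hb⟩ := onsSide_inv heights
  simp [hlm, ha]
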